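-- pv_equiv track=rewrite | github.com/chaechae4/MATHEMATICS-AND-PROGRAMMING | final_hw_250620.py | isit_ball
-- ===== SOURCE A (Python) =====
-- def isit_ball(ans_lst, num_lst):
--     ball = 0
--     for i in range(4):
--         if num_lst[i] != ans_lst[i] and num_lst[i] in ans_lst:
--             for j in range(4):
--                 if i != j and num_lst[i] == ans_lst[j]:
--                     ball += 1
--                     break
--     return ball
-- ===== SOURCE B (Python) =====
-- def isit_ball(ans_lst, num_lst):
--     # classic bulls-and-cows decomposition: balls = total hits - strikes
--     ans4 = ans_lst[:4]
--     strikes = sum(num_lst[i] == ans_lst[i] for i in range(4))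
--     hits = sum(num_lst[i] in ans4 for i in range(4))
--     return hits - strikes
-- ===== Notes on version B (the rewrite author's own statement) =====
-- stated objective: alternative
-- what changed: A's nested double loop with break is replaced by the classic bulls-and-cows decomposition: balls = (count of guess positions whose digit occurs among the first four answer digits) minus (count of exact-position matches), computed as two separate staged sums and a subtraction.
import Mathlib
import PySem

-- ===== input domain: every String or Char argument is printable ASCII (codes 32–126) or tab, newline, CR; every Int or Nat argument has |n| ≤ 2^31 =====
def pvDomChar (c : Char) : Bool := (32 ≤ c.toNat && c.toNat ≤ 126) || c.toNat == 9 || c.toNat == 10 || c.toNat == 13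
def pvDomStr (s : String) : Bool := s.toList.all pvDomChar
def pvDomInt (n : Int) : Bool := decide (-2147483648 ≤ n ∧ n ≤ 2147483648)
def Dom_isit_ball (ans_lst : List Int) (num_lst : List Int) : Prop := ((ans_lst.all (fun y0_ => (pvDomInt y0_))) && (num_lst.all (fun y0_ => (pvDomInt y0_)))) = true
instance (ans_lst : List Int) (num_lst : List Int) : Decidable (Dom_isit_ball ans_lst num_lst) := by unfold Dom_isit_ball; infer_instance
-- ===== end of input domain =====

-- B replaces A's nested loop by the bulls-and-cows identity balls = hits - strikes (objective: alternative).

-- ===== PORT A =====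
-- inner 'for j in range(4): … break' of A, transliterated with break semantics
def isitBallInner (ans_lst num_lst : List Int) (i : Int) (js : List Int) (ball : Int) : Int :=
  match js with
  | [] => ball
  | j :: rest =>
      if i ≠ j ∧ PySem.List.pyGetD num_lst i 0 = PySem.List.pyGetD ans_lst j 0
      then ball + 1
      else isitBallInner ans_lst num_lst i rest ball

def isit_ball (ans_lst : List Int) (num_lst : List Int) : Int :=
  (PySem.List.pyRange 0 4 1).foldl (fun ball i =>
    if PySem.List.pyGetD num_lst i 0 ≠ PySem.List.pyGetD ans_lst i 0 ∧
       PySem.List.pyGetD num_lst i 0 ∈ ans_lst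
    then isitBallInner ans_lst num_lst i (PySem.List.pyRange 0 4 1) ball
    else ball) 0

-- ===== PORT B =====
-- Source B: ans4 = ans_lst[:4]; strikes = sum(num_lst[i] == ans_lst[i] for i in range(4));
--       hits = sum(num_lst[i] in ans4 for i in range(4)); return hits - strikes
def isit_ball_alt (ans_lst : List Int) (num_lst : List Int) : Int :=
  let ans4 := PySem.List.slice ans_lst none (some 4)
  let strikes : Int := (PySem.List.pyRange 0 4 1).foldl (fun s i =>
    s + (if PySem.List.pyGetD num_lst i 0 = PySem.List.pyGetD ans_lst i 0 then 1 else 0)) 0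
  let hits : Int := (PySem.List.pyRange 0 4 1).foldl (fun s i =>
    s + (if PySem.List.pyGetD num_lst i 0 ∈ ans4 then 1 else 0)) 0
  hits - strikes

-- ===== PRECONDITION & SPEC =====
-- A indexes both lists at 0..3 unconditionally, so it raises IndexError iff either list is shorter than 4.
def Pre_isit_ball (ans_lst : List Int) (num_lst : List Int) : Prop :=
  4 ≤ ans_lst.length ∧ 4 ≤ num_lst.length
instance (ans_lst : List Int) (num_lst : List Int) : Decidable (Pre_isit_ball ans_lst num_lst) := by unfold Pre_isit_ball; infer_instance
def pvWitness_isit_ball : List Int × List Int := ([1, 2, 3, 4], [4, 3, 2, 1])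

def Spec_isit_ball (ans_lst : List Int) (num_lst : List Int) (out : Int) : Prop := out = isit_ball_alt ans_lst num_lst
instance (ans_lst : List Int) (num_lst : List Int) (out : Int) : Decidable (Spec_isit_ball ans_lst num_lst out) := by unfold Spec_isit_ball; infer_instance

-- ===== CLAIM (what is proved, stated in full; the proofs are below) =====
def Claim_equal_isit_ball : Prop := ∀ (ans_lst : List Int) (num_lst : List Int), Dom_isit_ball ans_lst num_lst → Pre_isit_ball ans_lst num_lst → Spec_isit_ball ans_lst num_lst (isit_ball ans_lst num_lst)

-- ===== LEMMAS AND PROOFS =====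

-- a fold over [0,1,2,3] whose every step adds a fixed contribution is the sum of the contributions
theorem pv_fold4 (f : Int → Int → Int) (c0 c1 c2 c3 : Int)
    (h0 : f 0 0 = 0 + c0) (h1 : ∀ b, f b 1 = b + c1)
    (h2 : ∀ b, f b 2 = b + c2) (h3 : ∀ b, f b 3 = b + c3) :
    ([0, 1, 2, 3] : List Int).foldl f 0 = c0 + c1 + c2 + c3 := by
  simp only [List.foldl, h1, h2, h3, h0]; ring

-- ===== VERDICT (by name: the statement is the Claim_ definition above) =====
set_option maxHeartbeats 2000000 in
theorem isit_ball_spec : Claim_equal_isit_ball := by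
  intro ans num _ hpre
  obtain ⟨ha, hn⟩ := hpre
  rcases ans with _ | ⟨a0, _ | ⟨a1, _ | ⟨a2, _ | ⟨a3, at_⟩⟩⟩⟩ <;>
    rcases num with _ | ⟨n0, _ | ⟨n1, _ | ⟨n2, _ | ⟨n3, nt⟩⟩⟩⟩ <;>
    try (simp at ha hn)
  unfold Spec_isit_ball isit_ball isit_ball_alt
  have hR : PySem.List.pyRange 0 4 1 = [0, 1, 2, 3] := by decide
  have h4 : (4 : Int) = ((4 : Nat) : Int) := by norm_num
  have hsa : PySem.List.slice (a0 :: a1 :: a2 :: a3 :: at_) none (some 4) = [a0, a1, a2, a3] := by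
    rw [h4, PySem.List.slice_to_natCast]; simp [List.take]
  rw [hR]
  simp only [hsa]
  -- per-position contribution of A's loop body: 1 hit minus 1 strike
  have key : ∀ i : Int, i = 0 ∨ i = 1 ∨ i = 2 ∨ i = 3 → ∀ b : Int,
      (if PySem.List.pyGetD (n0 :: n1 :: n2 :: n3 :: nt) i 0 ≠ PySem.List.pyGetD (a0 :: a1 :: a2 :: a3 :: at_) i 0 ∧
          PySem.List.pyGetD (n0 :: n1 :: n2 :: n3 :: nt) i 0 ∈ a0 :: a1 :: a2 :: a3 :: at_
       then isitBallInner (a0 :: a1 :: a2 :: a3 :: at_) (n0 :: n1 :: n2 :: n3 :: nt) i [0, 1, 2, 3] b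
       else b)
      = b + ((if PySem.List.pyGetD (n0 :: n1 :: n2 :: n3 :: nt) i 0 ∈ ([a0, a1, a2, a3] : List Int) then (1:Int) else 0)
           - (if PySem.List.pyGetD (n0 :: n1 :: n2 :: n3 :: nt) i 0 = PySem.List.pyGetD (a0 :: a1 :: a2 :: a3 :: at_) i 0 then (1:Int) else 0)) := by
    intro i hi b
    rcases hi with rfl | rfl | rfl | rfl <;>
      simp only [isitBallInner, PySem.List.pyGetD_ofNat'] <;>
      simp only [List.getD, List.getElem?_cons_zero, List.getElem?_cons_succ, Option.getD_some] <;>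
      norm_num [List.mem_cons] <;>
      (split_ifs <;> omega)
  rw [pv_fold4 _ _ _ _ _ (key 0 (by norm_num) 0) (key 1 (by norm_num)) (key 2 (by norm_num)) (key 3 (by norm_num))]
  simp only [List.foldl, PySem.List.pyGetD_ofNat', List.getD, List.getElem?_cons_zero, List.getElem?_cons_succ,
    Option.getD_some]
  norm_num [List.mem_cons]
  split_ifs <;> omega
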